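-- pv_equiv track=rewrite | github.com/MohamedAklamaash/DSA_CP | Graph/minmultoreachend.py | minimumMultiplications
-- ===== SOURCE A (Python) =====
-- from collections import deque
--
-- def minimumMultiplications(arr, start, end):
--     """
--     Find the minimum number of multiplications to transform 'start' to 'end' using elements from 'arr'.
--
--     :param arr: List[int] - List of integers to multiply.
--     :param start: int - Starting number.
--     :param end: int - Target number.
--     :return: int - Minimum multiplications, or -1 if not possible.
--     """
--     MOD = 10**5  # Limit the range of numbers
--     visited = set()
--     queue = deque([(start, 0)])  # (current number, steps)
--
--     while queue:
--         curr, steps = queue.popleft()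
--
--         # If we reach the end, return the steps
--         if curr == end:
--             return steps
--
--         # Process all possible multiplications
--         for num in arr:
--             next_val = (curr * num) % MOD
--
--             # If not visited, enqueue the next value
--             if next_val not in visited:
--                 visited.add(next_val)
--                 queue.append((next_val, steps + 1))
--
--     # If the queue is exhausted and end is not reached
--     return -1
-- ===== SOURCE B (Python) =====
-- def minimumMultiplications(arr, start, end):
--     """Level-synchronous BFS in two staged passes per level: first generate ALL
--     candidate products of the current frontier, then sift them against the
--     visited set to form the next frontier, with a level counter instead of a
--     queue of (value, steps) pairs."""
--     MOD = 10**5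
--     visited = set()
--     frontier = [start]
--     level = 0
--     while frontier:
--         if end in frontier:
--             return level
--         candidates = [(c * n) % MOD for c in frontier for n in arr]
--         next_frontier = []
--         for v in candidates:
--             if v not in visited:
--                 visited.add(v)
--                 next_frontier.append(v)
--         frontier = next_frontier
--         level += 1
--     return -1
-- ===== Notes on version B (the rewrite author's own statement) =====
-- stated objective: alternative
-- what changed: Replaces the queue of (value, steps) pairs popped one node at a time by a staged level-synchronous BFS: per level it first generates the full candidate list by a comprehension, then sifts it against the visited set in a second pass, keeping a level counter instead of per-node step tags.
import Mathlib
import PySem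

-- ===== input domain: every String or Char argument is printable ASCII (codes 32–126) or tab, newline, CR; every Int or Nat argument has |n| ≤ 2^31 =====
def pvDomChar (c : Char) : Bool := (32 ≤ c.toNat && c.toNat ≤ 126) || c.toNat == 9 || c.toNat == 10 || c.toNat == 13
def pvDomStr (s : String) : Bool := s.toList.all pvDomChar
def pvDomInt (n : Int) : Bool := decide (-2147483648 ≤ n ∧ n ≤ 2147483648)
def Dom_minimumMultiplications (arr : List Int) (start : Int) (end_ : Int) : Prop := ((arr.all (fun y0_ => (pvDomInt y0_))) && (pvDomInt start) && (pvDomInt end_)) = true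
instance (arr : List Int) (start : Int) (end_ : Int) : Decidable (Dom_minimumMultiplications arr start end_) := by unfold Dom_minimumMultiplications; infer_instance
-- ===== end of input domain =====

-- B replaces A's node-at-a-time queue BFS by a staged level-synchronous BFS
-- (generate every candidate of a level, then sift against visited): alternative decomposition, same cost.
-- In both ports Python's O(1) 'set' is ported as Std.HashSet (only membership and insert are used,
-- on which it is exact), and Python's deque/list appends as the standard O(1) encodings
-- (front/back-list queue for A, cons-then-reverse accumulator for B), so the ports evaluate fast.

-- ===== PORT A =====
-- inner 'for num in arr' loop of A: enqueue unvisited products (onto the back list), mark them visited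
def mmExpandA (arr : List Int) (curr steps : Int)
    (acc : List (Int × Int) × Std.HashSet Int) : List (Int × Int) × Std.HashSet Int :=
  arr.foldl (fun acc num =>
    let nextVal := PySem.Int.mod (curr * num) 100000
    if nextVal ∈ acc.2 then acc
    else ((nextVal, steps + 1) :: acc.1, acc.2.insert nextVal)) acc

-- 'while queue' loop of A; the deque is the standard front/back-list pair (popleft from front,
-- append consed onto back, rotate when front empties); fuel is only a totality guard (never
-- reached from the top-level call)
def mmBfsA (arr : List Int) (end_ : Int) : Nat → List (Int × Int) → List (Int × Int) → Std.HashSet Int → Int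
  | _, [], [], _ => -1
  | f, [], b :: bs, vis => mmBfsA arr end_ f ((b :: bs).reverse) [] vis
  | f, (curr, steps) :: rest, back, vis =>
    if curr = end_ then steps
    else
      match f with
      | 0 => -1
      | f' + 1 =>
        let bv := mmExpandA arr curr steps (back, vis)
        mmBfsA arr end_ f' rest bv.1 bv.2
termination_by f _ back _ => (f, back.length)
decreasing_by
  · exact Prod.Lex.right f (by simp)
  · exact Prod.Lex.left _ _ (Nat.lt_succ_self f')

def minimumMultiplications (arr : List Int) (start : Int) (end_ : Int) : Int :=
  mmBfsA arr end_ 100001 [(start, 0)] [] ∅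

-- ===== PORT B =====
-- the comprehension '[(c * n) % MOD for c in frontier for n in arr]'
def mmCand (arr : List Int) (frontier : List Int) : List Int :=
  frontier.flatMap (fun c => arr.map (fun n => PySem.Int.mod (c * n) 100000))

-- the sifting pass 'for v in candidates: if v not in visited: …' (next frontier accumulated
-- reversed, put back in order by the loop below)
def mmSift (cands : List Int) (acc : List Int × Std.HashSet Int) : List Int × Std.HashSet Int :=
  cands.foldl (fun acc v =>
    if v ∈ acc.2 then acc else (v :: acc.1, acc.2.insert v)) acc

-- 'while frontier' loop of B; fuel is only a totality guard (never reached from the top-level call)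
def mmBfsB (arr : List Int) (end_ : Int) : Nat → List Int → Std.HashSet Int → Int → Int
  | _, [], _, _ => -1
  | fuel, x :: xs, visited, level =>
    if end_ ∈ x :: xs then level
    else
      match fuel with
      | 0 => -1
      | f + 1 =>
        let fv := mmSift (mmCand arr (x :: xs)) ([], visited)
        mmBfsB arr end_ f fv.1.reverse fv.2 (level + 1)

def minimumMultiplications_alt (arr : List Int) (start : Int) (end_ : Int) : Int :=
  mmBfsB arr end_ 100001 [start] ∅ 0

-- ===== PRECONDITION & SPEC =====
def Spec_minimumMultiplications (arr : List Int) (start : Int) (end_ : Int) (out : Int) : Prop := out = minimumMultiplications_alt arr start end_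
instance (arr : List Int) (start : Int) (end_ : Int) (out : Int) : Decidable (Spec_minimumMultiplications arr start end_ out) := by unfold Spec_minimumMultiplications; infer_instance

-- ===== CLAIM (what is proved, stated in full; the proofs are below) =====
def Claim_equal_minimumMultiplications : Prop := ∀ (arr : List Int) (start : Int) (end_ : Int), Dom_minimumMultiplications arr start end_ → Spec_minimumMultiplications arr start end_ (minimumMultiplications arr start end_)

-- ===== LEMMAS AND PROOFS =====

-- PROOF-LAYER MODEL: the same two BFS loops over a plain list queue / PySem.Set visited list.
-- The ports are first shown to simulate the model, then the two model loops are shown equal.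

def mmExpandAM (arr : List Int) (curr steps : Int)
    (acc : List (Int × Int) × PySem.Set Int) : List (Int × Int) × PySem.Set Int :=
  arr.foldl (fun acc num =>
    let nextVal := PySem.Int.mod (curr * num) 100000
    if nextVal ∈ acc.2 then acc
    else (acc.1 ++ [(nextVal, steps + 1)], PySem.Set.add acc.2 nextVal)) acc

def mmBfsAM (arr : List Int) (end_ : Int) : Nat → List (Int × Int) → PySem.Set Int → Int
  | _, [], _ => -1
  | fuel, (curr, steps) :: rest, visited =>
    if curr = end_ then steps
    else
      match fuel with
      | 0 => -1
      | f + 1 =>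
        let qv := mmExpandAM arr curr steps (rest, visited)
        mmBfsAM arr end_ f qv.1 qv.2

def mmSiftM (cands : List Int) (acc : List Int × PySem.Set Int) : List Int × PySem.Set Int :=
  cands.foldl (fun acc v =>
    if v ∈ acc.2 then acc else (acc.1 ++ [v], PySem.Set.add acc.2 v)) acc

def mmBfsBM (arr : List Int) (end_ : Int) : Nat → List Int → PySem.Set Int → Int → Int
  | _, [], _, _ => -1
  | fuel, x :: xs, visited, level =>
    if end_ ∈ x :: xs then level
    else
      match fuel with
      | 0 => -1
      | f + 1 =>
        let fv := mmSiftM (mmCand arr (x :: xs)) ([], visited)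
        mmBfsBM arr end_ f fv.1 fv.2 (level + 1)

-- the fused expansion of one node (B's staged passes are shown equal to folding this)
def mmExpandP (arr : List Int) (curr : Int)
    (acc : List Int × PySem.Set Int) : List Int × PySem.Set Int :=
  arr.foldl (fun acc num =>
    let nextVal := PySem.Int.mod (curr * num) 100000
    if nextVal ∈ acc.2 then acc
    else (acc.1 ++ [nextVal], PySem.Set.add acc.2 nextVal)) acc

-- one fused level
def mmLevel (arr : List Int) (frontier : List Int) (visited : PySem.Set Int) :
    List Int × PySem.Set Int :=
  frontier.foldl (fun acc curr => mmExpandP arr curr acc) ([], visited)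

-- membership-equivalence between a port's HashSet and the model's visited list
def mmEquiv (h : Std.HashSet Int) (l : PySem.Set Int) : Prop := ∀ x : Int, x ∈ h ↔ x ∈ l

theorem mm_mod_eq (a : Int) : PySem.Int.mod a 100000 = a % 100000 :=
  PySem.Int.mod_eq_emod_of_pos (by norm_num)

theorem mm_emod_bounds (a : Int) : 0 ≤ a % 100000 ∧ a % 100000 < 100000 :=
  ⟨Int.emod_nonneg a (by norm_num), Int.emod_lt_of_pos a (by norm_num)⟩

theorem mm_set_add_of_not_mem (s : PySem.Set Int) (x : Int) (h : x ∉ s) :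
    PySem.Set.add s x = s ++ [x] := by
  simp [PySem.Set.add, PySem.Set.contains, h]

theorem mm_equiv_insert (h : Std.HashSet Int) (l : PySem.Set Int) (x : Int)
    (he : mmEquiv h l) (hx : x ∉ l) : mmEquiv (h.insert x) (PySem.Set.add l x) := by
  intro y
  rw [mm_set_add_of_not_mem l x hx]
  have h1 : y ∈ h.insert x ↔ x = y ∨ y ∈ h := by simp [Std.HashSet.mem_insert]
  have h2 : y ∈ l ++ [x] ↔ y ∈ l ∨ y = x := by simp [List.mem_append]
  rw [h1, h2, he y]
  exact ⟨fun h' => h'.elim (fun e => Or.inr e.symm) Or.inl,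
    fun h' => h'.elim Or.inr (fun e => Or.inl e.symm)⟩

-- ===== simulation: port A refines model A =====

theorem mm_expandA_sim (arr : List Int) (c s : Int) :
    ∀ (q back : List (Int × Int)) (vL : PySem.Set Int) (vH : Std.HashSet Int), mmEquiv vH vL →
    ∃ news : List (Int × Int),
      (mmExpandAM arr c s (q, vL)).1 = q ++ news ∧
      (mmExpandA arr c s (back, vH)).1 = news.reverse ++ back ∧
      mmEquiv (mmExpandA arr c s (back, vH)).2 (mmExpandAM arr c s (q, vL)).2 := by
  induction arr with
  | nil => exact fun q back vL vH he => ⟨[], by simp [mmExpandAM], by simp [mmExpandA], by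
      simpa [mmExpandAM, mmExpandA] using he⟩
  | cons num tl ih =>
    intro q back vL vH he
    by_cases hm : c * num % 100000 ∈ vL
    · have hmH : c * num % 100000 ∈ vH := (he _).2 hm
      obtain ⟨news, h1, h2, h3⟩ := ih q back vL vH he
      refine ⟨news, ?_, ?_, ?_⟩
      · simp only [mmExpandAM, List.foldl_cons] at h1 ⊢
        simpa [mm_mod_eq, hm] using h1
      · simp only [mmExpandA, List.foldl_cons] at h2 ⊢
        simpa [mm_mod_eq, hmH] using h2
      · simp only [mmExpandAM, mmExpandA, List.foldl_cons] at h3 ⊢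
        simpa [mm_mod_eq, hm, hmH] using h3
    · have hmH : c * num % 100000 ∉ vH := fun hc => hm ((he _).1 hc)
      have he' := mm_equiv_insert vH vL (c * num % 100000) he hm
      obtain ⟨news, h1, h2, h3⟩ := ih (q ++ [(c * num % 100000, s + 1)])
        ((c * num % 100000, s + 1) :: back)
        (PySem.Set.add vL (c * num % 100000)) (vH.insert (c * num % 100000)) he'
      refine ⟨(c * num % 100000, s + 1) :: news, ?_, ?_, ?_⟩
      · simp only [mmExpandAM, List.foldl_cons] at h1 ⊢
        simpa [mm_mod_eq, hm, List.append_assoc] using h1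
      · simp only [mmExpandA, List.foldl_cons] at h2 ⊢
        simpa [mm_mod_eq, hmH, List.reverse_cons, List.append_assoc] using h2
      · simp only [mmExpandAM, mmExpandA, List.foldl_cons] at h3 ⊢
        simpa [mm_mod_eq, hm, hmH] using h3

theorem mmBfsAM_nil (arr : List Int) (end_ : Int) (f : Nat) (v : PySem.Set Int) :
    mmBfsAM arr end_ f [] v = -1 := by
  cases f <;> simp [mmBfsAM]

theorem mmBfsAM_found (arr : List Int) (end_ : Int) (f : Nat) (curr steps : Int)
    (rest : List (Int × Int)) (v : PySem.Set Int) (h : curr = end_) :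
    mmBfsAM arr end_ f ((curr, steps) :: rest) v = steps := by
  cases f <;> simp [mmBfsAM, h]

theorem mmBfsAM_step (arr : List Int) (end_ : Int) (f : Nat) (curr steps : Int)
    (rest : List (Int × Int)) (v : PySem.Set Int) (h : ¬ curr = end_) :
    mmBfsAM arr end_ (f + 1) ((curr, steps) :: rest) v
      = mmBfsAM arr end_ f (mmExpandAM arr curr steps (rest, v)).1
          (mmExpandAM arr curr steps (rest, v)).2 := by
  simp [mmBfsAM, h]

-- the front/back pair simulates the plain list queue (nested induction: fuel, then back length)
theorem mm_bfsA_sim (arr : List Int) (end_ : Int) :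
    ∀ (f n : Nat) (front back : List (Int × Int)) (vL : PySem.Set Int) (vH : Std.HashSet Int),
    back.length ≤ n → mmEquiv vH vL →
    mmBfsA arr end_ f front back vH = mmBfsAM arr end_ f (front ++ back.reverse) vL := by
  intro f
  induction f with
  | zero =>
    intro n
    induction n with
    | zero =>
      intro front back vL vH hn he
      have hb : back = [] := List.eq_nil_of_length_eq_zero (Nat.le_zero.1 hn)
      subst hb
      cases front with
      | nil => simp [mmBfsA, mmBfsAM_nil]
      | cons p rest =>
        obtain ⟨c, s⟩ := p
        by_cases hc : c = end_
        · rw [List.cons_append, mmBfsAM_found arr end_ 0 c s _ vL hc]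
          simp [mmBfsA, hc]
        · simp [mmBfsA, mmBfsAM, hc]
    | succ n ihn =>
      intro front back vL vH hn he
      cases front with
      | nil =>
        cases back with
        | nil => simp [mmBfsA, mmBfsAM_nil]
        | cons b bs =>
          rw [show mmBfsA arr end_ 0 [] (b :: bs) vH
              = mmBfsA arr end_ 0 ((b :: bs).reverse) [] vH from by rw [mmBfsA]]
          rw [ihn ((b :: bs).reverse) [] vL vH (by simp) he]
          simp
      | cons p rest =>
        obtain ⟨c, s⟩ := p
        by_cases hc : c = end_
        · rw [List.cons_append, mmBfsAM_found arr end_ 0 c s _ vL hc]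
          simp [mmBfsA, hc]
        · simp [mmBfsA, mmBfsAM, hc]
  | succ f ihf =>
    intro n
    induction n with
    | zero =>
      intro front back vL vH hn he
      have hb : back = [] := List.eq_nil_of_length_eq_zero (Nat.le_zero.1 hn)
      subst hb
      cases front with
      | nil => simp [mmBfsA, mmBfsAM_nil]
      | cons p rest =>
        obtain ⟨c, s⟩ := p
        by_cases hc : c = end_
        · rw [List.cons_append, mmBfsAM_found arr end_ (f + 1) c s _ vL hc]
          simp [mmBfsA, hc]
        · obtain ⟨news, h1, h2, h3⟩ := mm_expandA_sim arr c s rest [] vL vH he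
          rw [show mmBfsA arr end_ (f + 1) ((c, s) :: rest) [] vH
              = mmBfsA arr end_ f rest (mmExpandA arr c s ([], vH)).1
                  (mmExpandA arr c s ([], vH)).2 from by rw [mmBfsA]; simp [hc]]
          simp only [List.reverse_nil, List.append_nil]
          rw [show ((c, s) :: rest : List (Int × Int)) = (c, s) :: rest from rfl,
            mmBfsAM_step arr end_ f c s rest vL hc, h1]
          rw [ihf ((mmExpandA arr c s ([], vH)).1.length) rest (mmExpandA arr c s ([], vH)).1
            (mmExpandAM arr c s (rest, vL)).2 (mmExpandA arr c s ([], vH)).2 le_rfl h3]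
          rw [h2]
          simp
    | succ n ihn =>
      intro front back vL vH hn he
      cases front with
      | nil =>
        cases back with
        | nil => simp [mmBfsA, mmBfsAM_nil]
        | cons b bs =>
          rw [show mmBfsA arr end_ (f + 1) [] (b :: bs) vH
              = mmBfsA arr end_ (f + 1) ((b :: bs).reverse) [] vH from by rw [mmBfsA]]
          rw [ihn ((b :: bs).reverse) [] vL vH (by simp) he]
          simp
      | cons p rest =>
        obtain ⟨c, s⟩ := p
        by_cases hc : c = end_
        · rw [List.cons_append, mmBfsAM_found arr end_ (f + 1) c s _ vL hc]
          simp [mmBfsA, hc]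
        · obtain ⟨news, h1, h2, h3⟩ := mm_expandA_sim arr c s (rest ++ back.reverse) back vL vH he
          rw [show mmBfsA arr end_ (f + 1) ((c, s) :: rest) back vH
              = mmBfsA arr end_ f rest (mmExpandA arr c s (back, vH)).1
                  (mmExpandA arr c s (back, vH)).2 from by rw [mmBfsA]; simp [hc]]
          rw [show ((c, s) :: rest) ++ back.reverse = (c, s) :: (rest ++ back.reverse) from rfl]
          rw [mmBfsAM_step arr end_ f c s (rest ++ back.reverse) vL hc, h1]
          rw [ihf ((mmExpandA arr c s (back, vH)).1.length) rest (mmExpandA arr c s (back, vH)).1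
            (mmExpandAM arr c s (rest ++ back.reverse, vL)).2 (mmExpandA arr c s (back, vH)).2
            le_rfl h3]
          rw [h2]
          simp

-- ===== simulation: port B refines model B =====

theorem mm_sift_sim (cands : List Int) :
    ∀ (accL accH : List Int) (vL : PySem.Set Int) (vH : Std.HashSet Int), mmEquiv vH vL →
    ∃ news : List Int,
      (mmSiftM cands (accL, vL)).1 = accL ++ news ∧
      (mmSift cands (accH, vH)).1 = news.reverse ++ accH ∧
      mmEquiv (mmSift cands (accH, vH)).2 (mmSiftM cands (accL, vL)).2 := by
  induction cands with
  | nil => exact fun accL accH vL vH he => ⟨[], by simp [mmSiftM], by simp [mmSift], by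
      simpa [mmSiftM, mmSift] using he⟩
  | cons v tl ih =>
    intro accL accH vL vH he
    by_cases hm : v ∈ vL
    · have hmH : v ∈ vH := (he _).2 hm
      obtain ⟨news, h1, h2, h3⟩ := ih accL accH vL vH he
      exact ⟨news, by simpa [mmSiftM, hm] using h1, by simpa [mmSift, hmH] using h2,
        by simpa [mmSiftM, mmSift, hm, hmH] using h3⟩
    · have hmH : v ∉ vH := fun hc => hm ((he _).1 hc)
      have he' := mm_equiv_insert vH vL v he hm
      obtain ⟨news, h1, h2, h3⟩ := ih (accL ++ [v]) (v :: accH)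
        (PySem.Set.add vL v) (vH.insert v) he'
      refine ⟨v :: news, ?_, ?_, ?_⟩
      · simp only [mmSiftM, List.foldl_cons] at h1 ⊢
        simpa [hm, List.append_assoc] using h1
      · simp only [mmSift, List.foldl_cons] at h2 ⊢
        simpa [hmH, List.reverse_cons, List.append_assoc] using h2
      · simp only [mmSiftM, mmSift, List.foldl_cons] at h3 ⊢
        simpa [hm, hmH] using h3

theorem mm_bfsB_sim (arr : List Int) (end_ : Int) :
    ∀ (f : Nat) (F : List Int) (vL : PySem.Set Int) (vH : Std.HashSet Int) (L : Int),
    mmEquiv vH vL → mmBfsB arr end_ f F vH L = mmBfsBM arr end_ f F vL L := by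
  intro f
  induction f with
  | zero =>
    intro F vL vH L he
    cases F with
    | nil => simp [mmBfsB, mmBfsBM]
    | cons x xs => by_cases hx : end_ ∈ x :: xs <;> simp [mmBfsB, mmBfsBM, hx]
  | succ f ih =>
    intro F vL vH L he
    cases F with
    | nil => simp [mmBfsB, mmBfsBM]
    | cons x xs =>
      by_cases hx : end_ ∈ x :: xs
      · simp [mmBfsB, mmBfsBM, hx]
      · obtain ⟨news, h1, h2, h3⟩ := mm_sift_sim (mmCand arr (x :: xs)) [] [] vL vH he
        simp only [List.nil_append] at h1
        simp only [List.append_nil] at h2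
        rw [show mmBfsB arr end_ (f + 1) (x :: xs) vH L
            = mmBfsB arr end_ f (mmSift (mmCand arr (x :: xs)) ([], vH)).1.reverse
                (mmSift (mmCand arr (x :: xs)) ([], vH)).2 (L + 1) from by
              rw [mmBfsB]; simp [hx]]
        rw [show mmBfsBM arr end_ (f + 1) (x :: xs) vL L
            = mmBfsBM arr end_ f (mmSiftM (mmCand arr (x :: xs)) ([], vL)).1
                (mmSiftM (mmCand arr (x :: xs)) ([], vL)).2 (L + 1) from by
              rw [mmBfsBM]; simp [hx]]
        rw [h1, h2, List.reverse_reverse]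
        exact ih news (mmSiftM (mmCand arr (x :: xs)) ([], vL)).2
          (mmSift (mmCand arr (x :: xs)) ([], vH)).2 (L + 1) h3

-- ===== model A = model B (level-by-level argument over the plain list model) =====

theorem mm_sift_append (l1 l2 : List Int) (a : List Int × PySem.Set Int) :
    mmSiftM (l1 ++ l2) a = mmSiftM l2 (mmSiftM l1 a) := by
  simp [mmSiftM, List.foldl_append]

theorem mm_sift_map (arr : List Int) (c : Int) (a : List Int × PySem.Set Int) :
    mmSiftM (arr.map (fun n => PySem.Int.mod (c * n) 100000)) a = mmExpandP arr c a := by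
  simp [mmSiftM, mmExpandP, List.foldl_map]

theorem mm_staged_eq_fused (arr : List Int) (F : List Int) (a : List Int × PySem.Set Int) :
    mmSiftM (mmCand arr F) a = F.foldl (fun acc curr => mmExpandP arr curr acc) a := by
  induction F generalizing a with
  | nil => simp [mmCand, mmSiftM]
  | cons x F ih =>
    rw [mmCand, List.flatMap_cons, mm_sift_append, mm_sift_map]
    exact ih (mmExpandP arr x a)

theorem mmBfsBM_nil (arr : List Int) (end_ : Int) (f : Nat) (v : PySem.Set Int) (L : Int) :
    mmBfsBM arr end_ f [] v L = -1 := by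
  cases f <;> simp [mmBfsBM]

theorem mmBfsBM_found (arr : List Int) (end_ : Int) (f : Nat) (x : Int) (xs : List Int)
    (v : PySem.Set Int) (L : Int) (h : end_ ∈ x :: xs) :
    mmBfsBM arr end_ f (x :: xs) v L = L := by
  cases f <;> simp [mmBfsBM, h]

theorem mmBfsBM_step (arr : List Int) (end_ : Int) (f : Nat) (x : Int) (xs : List Int)
    (v : PySem.Set Int) (L : Int) (h : ¬ end_ ∈ x :: xs) :
    mmBfsBM arr end_ (f + 1) (x :: xs) v L
      = mmBfsBM arr end_ f (mmLevel arr (x :: xs) v).1 (mmLevel arr (x :: xs) v).2 (L + 1) := by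
  simp [mmBfsBM, h, mm_staged_eq_fused, mmLevel]

-- A's inner loop is the fused expansion with the new nodes tagged with steps+1 and appended after q0
theorem mm_expandAB (arr : List Int) (curr L : Int) (q0 : List (Int × Int)) (n v : List Int) :
    mmExpandAM arr curr L (q0 ++ n.map (fun y => (y, L + 1)), v)
      = (q0 ++ ((mmExpandP arr curr (n, v)).1).map (fun y => (y, L + 1)),
         (mmExpandP arr curr (n, v)).2) := by
  induction arr generalizing n v with
  | nil => simp [mmExpandAM, mmExpandP]
  | cons num tl ih =>
    simp only [mmExpandAM, mmExpandP, List.foldl_cons] at ih ⊢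
    by_cases hm : curr * num % 100000 ∈ v
    · simpa [mm_mod_eq, hm] using ih n v
    · simpa [mm_mod_eq, hm, mm_set_add_of_not_mem _ _ hm, List.append_assoc] using
        ih (n ++ [curr * num % 100000]) (v ++ [curr * num % 100000])

-- what one node's fused expansion appends, with the facts needed for the invariants
theorem mm_expandP_step (arr : List Int) (c : Int) (a : List Int × List Int) :
    ∃ t, mmExpandP arr c a = (a.1 ++ t, a.2 ++ t) ∧ t.Nodup ∧
      ∀ x ∈ t, x ∉ a.2 ∧ 0 ≤ x ∧ x < 100000 := by
  induction arr generalizing a with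
  | nil => exact ⟨[], by simp [mmExpandP], by simp, by simp⟩
  | cons num tl ih =>
    by_cases hm : c * num % 100000 ∈ a.2
    · obtain ⟨t, h1, h2, h3⟩ := ih a
      refine ⟨t, ?_, h2, h3⟩
      simp only [mmExpandP, List.foldl_cons] at h1 ⊢
      simpa [mm_mod_eq, hm] using h1
    · obtain ⟨t, h1, h2, h3⟩ := ih (a.1 ++ [c * num % 100000],
        a.2 ++ [c * num % 100000])
      refine ⟨c * num % 100000 :: t, ?_, ?_, ?_⟩
      · simp only [mmExpandP, List.foldl_cons] at h1 ⊢
        simpa [mm_mod_eq, hm, mm_set_add_of_not_mem _ _ hm, List.append_assoc] using h1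
      · refine List.nodup_cons.2 ⟨fun hmem => ?_, h2⟩
        have := (h3 _ hmem).1
        simp at this
      · intro x hx
        rcases List.mem_cons.1 hx with rfl | hx'
        · exact ⟨hm, mm_emod_bounds _⟩
        · have := h3 x hx'
          simp only [List.mem_append, List.mem_singleton] at this
          exact ⟨fun hc => this.1 (Or.inl hc), this.2⟩

-- what a whole level appends
theorem mm_levelFold_step (arr : List Int) (F : List Int) (a : List Int × List Int) :
    ∃ t, F.foldl (fun acc curr => mmExpandP arr curr acc) a = (a.1 ++ t, a.2 ++ t) ∧ t.Nodup ∧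
      ∀ x ∈ t, x ∉ a.2 ∧ 0 ≤ x ∧ x < 100000 := by
  induction F generalizing a with
  | nil => exact ⟨[], by simp, by simp, by simp⟩
  | cons x F ih =>
    obtain ⟨t1, e1, n1, p1⟩ := mm_expandP_step arr x a
    obtain ⟨t2, e2, n2, p2⟩ := ih (a.1 ++ t1, a.2 ++ t1)
    refine ⟨t1 ++ t2, ?_, ?_, ?_⟩
    · rw [List.foldl_cons, e1]
      simpa [List.append_assoc] using e2
    · have hdisj : t1.Disjoint t2 := by
        intro a ha1 ha2
        exact (p2 a ha2).1 (List.mem_append.2 (Or.inr ha1))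
      exact List.Nodup.append n1 n2 hdisj
    · intro x hx
      rcases List.mem_append.1 hx with hx' | hx'
      · exact p1 x hx'
      · have := p2 x hx'
        simp only [List.mem_append] at this
        exact ⟨fun hc => this.1 (Or.inl hc), this.2⟩

-- when every residue is visited, expansion adds nothing
theorem mm_expandP_full (arr : List Int) (c : Int) (a : List Int × PySem.Set Int)
    (h : ∀ k : Int, 0 ≤ k → k < 100000 → k ∈ a.2) : mmExpandP arr c a = a := by
  induction arr with
  | nil => simp [mmExpandP]
  | cons num tl ih =>
    simp only [mmExpandP, List.foldl_cons] at ih ⊢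
    have hbo := mm_emod_bounds (c * num)
    have hm : (c * num) % 100000 ∈ a.2 := h _ hbo.1 hbo.2
    simpa [mm_mod_eq, hm] using ih

theorem mm_level_full (arr : List Int) (F : List Int) (a : List Int × PySem.Set Int)
    (h : ∀ k : Int, 0 ≤ k → k < 100000 → k ∈ a.2) :
    F.foldl (fun acc curr => mmExpandP arr curr acc) a = a := by
  induction F with
  | nil => rfl
  | cons x F ih => rw [List.foldl_cons, mm_expandP_full arr x a h]; exact ih

theorem mm_nodup_map_toNat (v : List Int) (hn : v.Nodup) (hb : ∀ x ∈ v, 0 ≤ x ∧ x < 100000) :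
    (v.map Int.toNat).Nodup ∧ (v.map Int.toNat).toFinset ⊆ Finset.range 100000 := by
  constructor
  · exact List.Nodup.map_on (fun x hx y hy hf => by
      have := hb x hx; have := hb y hy; omega) hn
  · intro k hk
    simp only [List.mem_toFinset, List.mem_map] at hk
    obtain ⟨x, hx, rfl⟩ := hk
    have := hb x hx
    simp only [Finset.mem_range]
    omega

theorem mm_len_le (v : List Int) (hn : v.Nodup) (hb : ∀ x ∈ v, 0 ≤ x ∧ x < 100000) :
    v.length ≤ 100000 := by
  obtain ⟨hmn, hsub⟩ := mm_nodup_map_toNat v hn hb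
  have hcard : (v.map Int.toNat).toFinset.card = v.length := by
    rw [List.toFinset_card_of_nodup hmn, List.length_map]
  have := Finset.card_le_card hsub
  simpa [hcard] using this

theorem mm_full_of_len (v : List Int) (hn : v.Nodup) (hb : ∀ x ∈ v, 0 ≤ x ∧ x < 100000)
    (hl : 100000 ≤ v.length) : ∀ k : Int, 0 ≤ k → k < 100000 → k ∈ v := by
  obtain ⟨hmn, hsub⟩ := mm_nodup_map_toNat v hn hb
  have hcard : (v.map Int.toNat).toFinset.card = v.length := by
    rw [List.toFinset_card_of_nodup hmn, List.length_map]
  have heq : (v.map Int.toNat).toFinset = Finset.range 100000 :=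
    Finset.eq_of_subset_of_card_le hsub (by rw [hcard, Finset.card_range]; omega)
  intro k hk0 hk1
  have hmem : k.toNat ∈ Finset.range 100000 := by simp only [Finset.mem_range]; omega
  rw [← heq] at hmem
  simp only [List.mem_toFinset, List.mem_map] at hmem
  obtain ⟨x, hx, hxe⟩ := hmem
  have := hb x hx
  have : x = k := by omega
  exact this ▸ hx

-- model A returns the current level as soon as end_ is in the level-L prefix of the queue
theorem mm_bfsA_finds (arr : List Int) (end_ L : Int) :
    ∀ (xs : List Int) (n v : List Int) (f : Nat), end_ ∈ xs →
    mmBfsAM arr end_ (f + xs.length)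
      (xs.map (fun y => (y, L)) ++ n.map (fun y => (y, L + 1))) v = L := by
  intro xs
  induction xs with
  | nil => intro n v f h; simp at h
  | cons x rest ih =>
    intro n v f h
    simp only [List.map_cons, List.cons_append]
    by_cases hx : x = end_
    · rw [mmBfsAM_found arr end_ _ x L _ v hx]
    · have hrest : end_ ∈ rest := by
        rcases List.mem_cons.1 h with h' | h'
        · exact absurd h'.symm hx
        · exact h'
      rw [List.length_cons, show f + (rest.length + 1) = (f + rest.length) + 1 from by omega]
      rw [mmBfsAM_step arr end_ _ x L _ v hx]
      rw [mm_expandAB arr x L (rest.map (fun y => (y, L))) n v]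
      exact ih (mmExpandP arr x (n, v)).1 (mmExpandP arr x (n, v)).2 f hrest

-- model A consumes a whole level of the queue, producing exactly the fused level fold
theorem mm_bfsA_level (arr : List Int) (end_ L : Int) :
    ∀ (xs : List Int) (n v : List Int) (f : Nat), (∀ x ∈ xs, x ≠ end_) →
    mmBfsAM arr end_ (f + xs.length)
      (xs.map (fun y => (y, L)) ++ n.map (fun y => (y, L + 1))) v
    = mmBfsAM arr end_ f
        ((xs.foldl (fun acc curr => mmExpandP arr curr acc) (n, v)).1.map (fun y => (y, L + 1)))
        (xs.foldl (fun acc curr => mmExpandP arr curr acc) (n, v)).2 := by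
  intro xs
  induction xs with
  | nil => intro n v f _; simp
  | cons x rest ih =>
    intro n v f h
    simp only [List.map_cons, List.cons_append, List.length_cons, List.foldl_cons]
    rw [show f + (rest.length + 1) = (f + rest.length) + 1 from by omega]
    rw [mmBfsAM_step arr end_ _ x L _ v (h x (List.mem_cons_self ..))]
    rw [mm_expandAB arr x L (rest.map (fun y => (y, L))) n v]
    exact ih (mmExpandP arr x (n, v)).1 (mmExpandP arr x (n, v)).2 f
      (fun y hy => h y (List.mem_cons_of_mem _ hy))

-- specialized corollaries at the start of a level (empty level-(L+1) suffix)
theorem mm_bfsA_finds' (arr : List Int) (end_ L : Int) (xs v : List Int) (fA : Nat)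
    (h : end_ ∈ xs) (hf : xs.length ≤ fA) :
    mmBfsAM arr end_ fA (xs.map (fun y => (y, L))) v = L := by
  have := mm_bfsA_finds arr end_ L xs [] v (fA - xs.length) h
  rw [show fA - xs.length + xs.length = fA from by omega] at this
  simpa using this

theorem mm_bfsA_level' (arr : List Int) (end_ L : Int) (xs v : List Int) (fA : Nat)
    (h : ∀ x ∈ xs, x ≠ end_) (hf : xs.length ≤ fA) :
    mmBfsAM arr end_ fA (xs.map (fun y => (y, L))) v
      = mmBfsAM arr end_ (fA - xs.length)
          ((mmLevel arr xs v).1.map (fun y => (y, L + 1))) (mmLevel arr xs v).2 := by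
  have := mm_bfsA_level arr end_ L xs [] v (fA - xs.length) h
  rw [show fA - xs.length + xs.length = fA from by omega] at this
  simpa [mmLevel] using this

-- main simulation: with sufficient fuel, model queue BFS at level L equals model frontier BFS
theorem mm_main (arr : List Int) (end_ : Int) :
    ∀ (fB : Nat) (F v : List Int) (L : Int) (fA : Nat),
    v.Nodup → (∀ x ∈ v, 0 ≤ x ∧ x < 100000) →
    F.length + (100000 - v.length) ≤ fA → (100000 - v.length) ≤ fB →
    mmBfsAM arr end_ fA (F.map (fun y => (y, L))) v = mmBfsBM arr end_ fB F v L := by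
  intro fB
  induction fB with
  | zero =>
    intro F v L fA hn hb hfa hfb
    cases F with
    | nil => simp [mmBfsAM_nil, mmBfsBM_nil]
    | cons x xs =>
      have hfull : ∀ k : Int, 0 ≤ k → k < 100000 → k ∈ v :=
        mm_full_of_len v hn hb (by omega)
      by_cases he : end_ ∈ x :: xs
      · rw [mmBfsBM_found arr end_ 0 x xs v L he]
        exact mm_bfsA_finds' arr end_ L (x :: xs) v fA he (by simp at hfa ⊢; omega)
      · have hne : ∀ y ∈ x :: xs, y ≠ end_ := fun y hy hc => he (hc ▸ hy)
        rw [mm_bfsA_level' arr end_ L (x :: xs) v fA hne (by simp at hfa ⊢; omega)]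
        rw [show mmLevel arr (x :: xs) v = ([], v) from mm_level_full arr (x :: xs) ([], v) hfull]
        simp [mmBfsAM_nil, mmBfsBM, he]
  | succ f ih =>
    intro F v L fA hn hb hfa hfb
    cases F with
    | nil => simp [mmBfsAM_nil, mmBfsBM_nil]
    | cons x xs =>
      by_cases he : end_ ∈ x :: xs
      · rw [mmBfsBM_found arr end_ (f + 1) x xs v L he]
        exact mm_bfsA_finds' arr end_ L (x :: xs) v fA he (by simp at hfa ⊢; omega)
      · have hne : ∀ y ∈ x :: xs, y ≠ end_ := fun y hy hc => he (hc ▸ hy)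
        rw [mm_bfsA_level' arr end_ L (x :: xs) v fA hne (by simp at hfa ⊢; omega)]
        rw [mmBfsBM_step arr end_ f x xs v L he]
        obtain ⟨t, e1, tn, tp⟩ := mm_levelFold_step arr (x :: xs) ([], v)
        simp only [List.nil_append] at e1
        have elev : mmLevel arr (x :: xs) v = (t, v ++ t) := by rw [mmLevel, e1]
        rw [elev]
        have hn' : (v ++ t).Nodup := by
          have hdisj : v.Disjoint t := by
            intro a ha1 ha2
            exact (tp a ha2).1 ha1
          exact List.Nodup.append hn tn hdisj
        have hb' : ∀ y ∈ v ++ t, 0 ≤ y ∧ y < 100000 := by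
          intro y hy
          rcases List.mem_append.1 hy with hy' | hy'
          · exact hb y hy'
          · exact (tp y hy').2
        have hlen : v.length + t.length ≤ 100000 := by
          have := mm_len_le (v ++ t) hn' hb'
          simpa [List.length_append] using this
        cases t with
        | nil => simp [mmBfsAM_nil, mmBfsBM_nil]
        | cons y t' =>
          apply ih (y :: t') (v ++ y :: t') (L + 1) (fA - (x :: xs).length) hn' hb'
          · simp only [List.length_append, List.length_cons] at hlen ⊢
            simp only [List.length_cons] at hfa
            omega
          · simp only [List.length_append, List.length_cons] at hlen ⊢
            omega

theorem mm_equiv_empty : mmEquiv (∅ : Std.HashSet Int) ([] : PySem.Set Int) := by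
  intro x; simp

-- ===== VERDICT (by name: the statement is the Claim_ definition above) =====
theorem minimumMultiplications_spec : Claim_equal_minimumMultiplications := by
  intro arr start end_ _
  unfold Spec_minimumMultiplications minimumMultiplications minimumMultiplications_alt
  rw [mm_bfsA_sim arr end_ 100001 0 [(start, 0)] [] [] ∅ (by simp) mm_equiv_empty]
  rw [mm_bfsB_sim arr end_ 100001 [start] [] ∅ 0 mm_equiv_empty]
  have h := mm_main arr end_ 100001 [start] [] 0 100001 (by simp) (by simp)
    (by simp) (by simp)
  simpa using h
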